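-- pv_equiv track=rewrite | github.com/MarkusMaal/parkimise-registreerimine | funktsioonid.py | kontrolli_sobivust
-- ===== SOURCE A (Python) =====
-- def kontrolli_sobivust(number):
--     if not len(number) == 6:
--         return False
--     else:
--         tähestik = "ABCDEFGHIJKLMNOPQRSTUVWXYZ"
--         for i in range(3):
--             sobiv = False
--             for n in range(10):
--                 if number[i] == str(n):
--                     sobiv = True
--             if not sobiv:
--                 return False
--             sobiv = False
--             for täht in tähestik:
--                 if number[i+3] == täht:
--                     sobiv = True
--             if not sobiv:
--                 return False
--         return True
-- ===== SOURCE B (Python) =====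
-- import re
--
-- def kontrolli_sobivust(number):
--     return bool(re.fullmatch(r'[0-9]{3}[A-Z]{3}', number))
-- ===== Notes on version B (the rewrite author's own statement) =====
-- stated objective: idiomatic
-- what changed: Replaced the nested character-by-character scanning loops (outer range(3), inner range(10) and alphabet scan) with a single ASCII-explicit regex fullmatch r'[0-9]{3}[A-Z]{3}'.
import Mathlib
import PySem

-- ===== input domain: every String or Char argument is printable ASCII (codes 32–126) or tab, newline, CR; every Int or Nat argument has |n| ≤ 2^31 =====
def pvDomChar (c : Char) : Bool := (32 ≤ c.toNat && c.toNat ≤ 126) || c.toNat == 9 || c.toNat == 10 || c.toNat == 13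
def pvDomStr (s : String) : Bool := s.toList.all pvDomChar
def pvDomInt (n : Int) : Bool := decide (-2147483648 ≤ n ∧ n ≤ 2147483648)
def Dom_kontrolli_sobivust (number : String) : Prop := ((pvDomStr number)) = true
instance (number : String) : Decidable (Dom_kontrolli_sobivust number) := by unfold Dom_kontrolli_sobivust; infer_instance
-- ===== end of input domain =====

-- B replaces A's nested scanning loops (range(3) × range(10) / alphabet scan) by a single
-- ASCII regex fullmatch r'[0-9]{3}[A-Z]{3}' (ported as its character-class meaning): idiomatic, not faster.

-- ===== PORT A =====
-- the loop body of 'for i in range(3)' with its two early returns (False = early return)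
def pvLoopA (cs : List Char) : List Int → Bool
  | [] => true
  | i :: rest =>
    let sobiv := (PySem.List.pyRange 0 10 1).foldl
      (fun s n => if [PySem.List.pyGetD cs i ' '] == PySem.Int.toChars n then true else s) false
    if !sobiv then false
    else
      let sobiv2 := "ABCDEFGHIJKLMNOPQRSTUVWXYZ".toList.foldl
        (fun s t => if PySem.List.pyGetD cs (i + 3) ' ' == t then true else s) false
      if !sobiv2 then false else pvLoopA cs rest

-- pyGetD with default ' ' is exact here: pvLoopA is only entered with cs.length = 6 and i ∈ {0,1,2},
-- so every index Python reads is in range.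
def kontrolli_sobivust (number : String) : Bool :=
  if !(number.toList.length == 6) then false
  else pvLoopA number.toList (PySem.List.pyRange 0 3 1)

-- ===== PORT B =====
-- re.fullmatch(r'[0-9]{3}[A-Z]{3}', number): exactly 6 chars, first 3 in ASCII [0-9], last 3 in ASCII [A-Z]
def kontrolli_sobivust_alt (number : String) : Bool :=
  let cs := number.toList
  cs.length == 6 &&
    (cs.take 3).all (fun c => 48 ≤ c.toNat && c.toNat ≤ 57) &&
    (cs.drop 3).all (fun c => 65 ≤ c.toNat && c.toNat ≤ 90)

-- ===== PRECONDITION & SPEC =====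
def Spec_kontrolli_sobivust (number : String) (out : Bool) : Prop := out = kontrolli_sobivust_alt number
instance (number : String) (out : Bool) : Decidable (Spec_kontrolli_sobivust number out) := by unfold Spec_kontrolli_sobivust; infer_instance

-- ===== CLAIM (what is proved, stated in full; the proofs are below) =====
def Claim_equal_kontrolli_sobivust : Prop := ∀ (number : String), Dom_kontrolli_sobivust number → Spec_kontrolli_sobivust number (kontrolli_sobivust number)

-- ===== LEMMAS AND PROOFS =====
theorem char_beq_toNat (c d : Char) : (c == d) = decide (c.toNat = d.toNat) := by
  rcases c with ⟨v, hv⟩; rcases d with ⟨w, hw⟩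
  simp [Char.toNat, BEq.beq, Char.ext_iff, UInt32.ext_iff]

-- A's inner 'for n in range(10)' scan equals the ASCII digit class test
theorem digit_scan (c : Char) :
    (PySem.List.pyRange 0 10 1).foldl
      (fun s n => if [c] == PySem.Int.toChars n then true else s) false
    = (48 ≤ c.toNat && c.toNat ≤ 57) := by
  have hr : PySem.List.pyRange 0 10 1 = [0,1,2,3,4,5,6,7,8,9] := by decide
  rw [hr]
  simp only [List.foldl,
    show PySem.Int.toChars 0 = ['0'] from by decide,
    show PySem.Int.toChars 1 = ['1'] from by decide,
    show PySem.Int.toChars 2 = ['2'] from by decide,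
    show PySem.Int.toChars 3 = ['3'] from by decide,
    show PySem.Int.toChars 4 = ['4'] from by decide,
    show PySem.Int.toChars 5 = ['5'] from by decide,
    show PySem.Int.toChars 6 = ['6'] from by decide,
    show PySem.Int.toChars 7 = ['7'] from by decide,
    show PySem.Int.toChars 8 = ['8'] from by decide,
    show PySem.Int.toChars 9 = ['9'] from by decide]
  simp only [List.cons_beq_cons, char_beq_toNat]
  simp only [Bool.if_true_left]
  rw [Bool.eq_iff_iff]
  simp only [
    show '0'.toNat = 48 from rfl,
    show '1'.toNat = 49 from rfl,
    show '2'.toNat = 50 from rfl,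
    show '3'.toNat = 51 from rfl,
    show '4'.toNat = 52 from rfl,
    show '5'.toNat = 53 from rfl,
    show '6'.toNat = 54 from rfl,
    show '7'.toNat = 55 from rfl,
    show '8'.toNat = 56 from rfl,
    show '9'.toNat = 57 from rfl]
  simp
  omega

-- A's inner alphabet scan equals the ASCII uppercase class test
theorem letter_scan (c : Char) :
    "ABCDEFGHIJKLMNOPQRSTUVWXYZ".toList.foldl (fun s t => if c == t then true else s) false
    = (65 ≤ c.toNat && c.toNat ≤ 90) := by
  have hs : "ABCDEFGHIJKLMNOPQRSTUVWXYZ".toList = ['A', 'B', 'C', 'D', 'E', 'F', 'G', 'H', 'I', 'J', 'K', 'L', 'M', 'N', 'O', 'P', 'Q', 'R', 'S', 'T', 'U', 'V', 'W', 'X', 'Y', 'Z'] := by decide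
  rw [hs]
  simp only [List.foldl, char_beq_toNat]
  simp only [Bool.if_true_left]
  rw [Bool.eq_iff_iff]
  simp only [
    show 'A'.toNat = 65 from rfl,
    show 'B'.toNat = 66 from rfl,
    show 'C'.toNat = 67 from rfl,
    show 'D'.toNat = 68 from rfl,
    show 'E'.toNat = 69 from rfl,
    show 'F'.toNat = 70 from rfl,
    show 'G'.toNat = 71 from rfl,
    show 'H'.toNat = 72 from rfl,
    show 'I'.toNat = 73 from rfl,
    show 'J'.toNat = 74 from rfl,
    show 'K'.toNat = 75 from rfl,
    show 'L'.toNat = 76 from rfl,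
    show 'M'.toNat = 77 from rfl,
    show 'N'.toNat = 78 from rfl,
    show 'O'.toNat = 79 from rfl,
    show 'P'.toNat = 80 from rfl,
    show 'Q'.toNat = 81 from rfl,
    show 'R'.toNat = 82 from rfl,
    show 'S'.toNat = 83 from rfl,
    show 'T'.toNat = 84 from rfl,
    show 'U'.toNat = 85 from rfl,
    show 'V'.toNat = 86 from rfl,
    show 'W'.toNat = 87 from rfl,
    show 'X'.toNat = 88 from rfl,
    show 'Y'.toNat = 89 from rfl,
    show 'Z'.toNat = 90 from rfl]
  simp
  omega

-- ===== VERDICT (by name: the statement is the Claim_ definition above) =====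
theorem kontrolli_sobivust_spec : Claim_equal_kontrolli_sobivust := by
  intro number _
  unfold Spec_kontrolli_sobivust kontrolli_sobivust kontrolli_sobivust_alt
  rcases hcs : number.toList with _ | ⟨a, _ | ⟨b, _ | ⟨c, _ | ⟨d, _ | ⟨e, _ | ⟨f, rest⟩⟩⟩⟩⟩⟩ <;>
    simp only []
  case cons.cons.cons.cons.cons.cons =>
    cases rest with
    | cons g gs => simp [List.length]
    | nil =>
      have hr3 : PySem.List.pyRange 0 3 1 = [0, 1, 2] := by decide
      simp only [hr3, pvLoopA,
        show (0:Int) + 3 = 3 from rfl, show (1:Int) + 3 = 4 from rfl, show (2:Int) + 3 = 5 from rfl,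
        show PySem.List.pyGetD [a,b,c,d,e,f] (0:Int) ' ' = a from rfl,
        show PySem.List.pyGetD [a,b,c,d,e,f] (1:Int) ' ' = b from rfl,
        show PySem.List.pyGetD [a,b,c,d,e,f] (2:Int) ' ' = c from rfl,
        show PySem.List.pyGetD [a,b,c,d,e,f] (3:Int) ' ' = d from rfl,
        show PySem.List.pyGetD [a,b,c,d,e,f] (4:Int) ' ' = e from rfl,
        show PySem.List.pyGetD [a,b,c,d,e,f] (5:Int) ' ' = f from rfl]
      rw [digit_scan a, digit_scan b, digit_scan c, letter_scan d, letter_scan e, letter_scan f]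
      simp only [List.length_cons, List.length_nil, List.take, List.drop, List.all_cons, List.all_nil,
        show ((0:Nat) + 1 + 1 + 1 + 1 + 1 + 1 == 6) = true from rfl]
      generalize (decide (48 ≤ a.toNat) && decide (a.toNat ≤ 57)) = p1
      generalize (decide (48 ≤ b.toNat) && decide (b.toNat ≤ 57)) = p2
      generalize (decide (48 ≤ c.toNat) && decide (c.toNat ≤ 57)) = p3
      generalize (decide (65 ≤ d.toNat) && decide (d.toNat ≤ 90)) = q1
      generalize (decide (65 ≤ e.toNat) && decide (e.toNat ≤ 90)) = q2
      generalize (decide (65 ≤ f.toNat) && decide (f.toNat ≤ 90)) = q3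
      revert p1 p2 p3 q1 q2 q3
      decide
  all_goals simp [List.length]
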